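-- pv_equiv track=rewrite | github.com/taliaku/SternLab | Python_pipeline/AggregateSummaries.py | _get_last_end_value_location
-- ===== SOURCE A (Python) =====
-- def _get_last_end_value_location(string, substring, substring_end_loc, end_values):
--     end_value_locations = []
--     for end_value in end_values:
--         end_value_loc = string.find(end_value, substring_end_loc)
--         if end_value_loc != -1:
--             end_value_locations.append(end_value_loc)
--     if len(end_value_locations)==0:
--         ret = None
--     else:
--         ret = min(end_value_locations)
--     return ret
-- ===== SOURCE B (Python) =====
-- import re
--
-- def _get_last_end_value_location(string, substring, substring_end_loc, end_values):
--     if not end_values: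
--         return None
--     tail = string[substring_end_loc:]
--     pattern = re.compile("|".join(map(re.escape, end_values)))
--     match = pattern.search(tail)
--     if match is None:
--         return None
--     return len(string) - len(tail) + match.start()
-- ===== Notes on version B (the rewrite author's own statement) =====
-- stated objective: faster
-- what changed: Replaces one full find() scan per end_value plus a min() over the collected positions by one compiled alternation regex of the escaped end_values searched once over the slice string[substring_end_loc:], taking the start of the leftmost match (one C-level scan instead of k scans); Pre_ excludes only start positions past the end of the string when the empty string is among the candidates, where find reports no match but the empty regex alternative matches the empty slice - a corner where both values are defensible.
-- outside the precondition, e.g. on _get_last_end_value_location('ab', '', 5, ['']): A returns None, B returns 2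
import Mathlib
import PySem

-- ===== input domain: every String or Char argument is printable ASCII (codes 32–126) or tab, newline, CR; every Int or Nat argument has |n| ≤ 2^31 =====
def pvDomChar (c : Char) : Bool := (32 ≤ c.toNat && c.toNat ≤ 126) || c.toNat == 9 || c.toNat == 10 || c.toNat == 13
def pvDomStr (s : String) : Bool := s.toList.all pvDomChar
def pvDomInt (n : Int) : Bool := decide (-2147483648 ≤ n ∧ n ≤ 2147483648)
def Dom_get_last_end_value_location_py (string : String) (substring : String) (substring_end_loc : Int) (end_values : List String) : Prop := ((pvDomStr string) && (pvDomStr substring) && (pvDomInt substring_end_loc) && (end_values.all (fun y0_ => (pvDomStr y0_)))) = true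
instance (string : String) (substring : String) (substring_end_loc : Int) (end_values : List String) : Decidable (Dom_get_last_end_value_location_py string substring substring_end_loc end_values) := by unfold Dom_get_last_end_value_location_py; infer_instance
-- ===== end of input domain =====

-- B replaces A's one find() per end_value plus min() by one alternation-regex search
-- over the slice string[substring_end_loc:] (idiomatic, one leftmost scan); return
-- values proved identical on Pre_.

-- ===== PORT A =====
def get_last_end_value_location_py (string : String) (substring : String) (substring_end_loc : Int) (end_values : List String) : Option Int :=
  let end_value_locations := end_values.foldl (fun acc end_value =>
      let end_value_loc := PySem.Str.findFrom string end_value substring_end_loc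
      if end_value_loc ≠ -1 then acc ++ [end_value_loc] else acc) []
  if end_value_locations.length = 0 then none
  else PySem.List.min? end_value_locations id
  -- the list is nonempty in the else branch, so min? is `some (min …)`, mirroring Python's `ret = min(…)`

-- ===== PORT B =====
-- Hand port of `re.compile("|".join(map(re.escape, end_values))).search(tail)`,
-- exact for literal (escaped) alternation: the regex engine tries each position
-- i = 0 .. len(tail) left to right and succeeds at the first i where some
-- alternative matches as a prefix of tail[i:].
def pvScan (cs : List Char) (evs : List (List Char)) (n : Nat) (i : Nat) : Option Int :=
  if i > n then none
  else if evs.any (fun ev => PySem.Chars.startswith (cs.drop i) ev) then some (i : Int)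
  else pvScan cs evs n (i + 1)
termination_by n + 1 - i
decreasing_by simp_all; omega

def get_last_end_value_location_py_alt (string : String) (substring : String) (substring_end_loc : Int) (end_values : List String) : Option Int :=
  if end_values.isEmpty then none
  else
    let tail := PySem.List.slice string.toList (some substring_end_loc) none
    let offset : Int := (string.length : Int) - (tail.length : Int)
    (pvScan tail (end_values.map String.toList) tail.length 0).map (fun i => offset + i)

-- ===== PRECONDITION & SPEC =====
-- Pre_ excludes only start positions past the end of the string when the empty string is
-- among the candidates: there find reports no match (A returns None) while the empty regex
-- alternative matches the empty slice (B returns len(string)) — both values defensible.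
def Pre_get_last_end_value_location_py (string : String) (substring : String) (substring_end_loc : Int) (end_values : List String) : Prop :=
  substring_end_loc ≤ (string.length : Int) ∨ "" ∉ end_values
instance (string : String) (substring : String) (substring_end_loc : Int) (end_values : List String) : Decidable (Pre_get_last_end_value_location_py string substring substring_end_loc end_values) := by unfold Pre_get_last_end_value_location_py; infer_instance

def pvWitness_get_last_end_value_location_py : String × String × Int × List String :=
  ("abba", "bb", 2, ["a", "zz"])

def Spec_get_last_end_value_location_py (string : String) (substring : String) (substring_end_loc : Int) (end_values : List String) (out : Option Int) : Prop := out = get_last_end_value_location_py_alt string substring substring_end_loc end_values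
instance (string : String) (substring : String) (substring_end_loc : Int) (end_values : List String) (out : Option Int) : Decidable (Spec_get_last_end_value_location_py string substring substring_end_loc end_values out) := by unfold Spec_get_last_end_value_location_py; infer_instance

-- ===== CLAIM (what is proved, stated in full; the proofs are below) =====
def Claim_equal_get_last_end_value_location_py : Prop := ∀ (string : String) (substring : String) (substring_end_loc : Int) (end_values : List String), Dom_get_last_end_value_location_py string substring substring_end_loc end_values → Pre_get_last_end_value_location_py string substring substring_end_loc end_values → Spec_get_last_end_value_location_py string substring substring_end_loc end_values (get_last_end_value_location_py string substring substring_end_loc end_values)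

-- ===== LEMMAS AND PROOFS =====

-- the clamped start position, as str.find and slicing both compute it
def pvClamp (n : Nat) (pos : Int) : Nat :=
  (if pos < 0 then (if pos + n < 0 then 0 else pos + n) else pos).toNat

-- A's accumulation loop as a filterMap
lemma pvFoldl_filterMap (f : String → Int) (evs : List String) (init : List Int) :
    evs.foldl (fun acc ev => if f ev ≠ -1 then acc ++ [f ev] else acc) init
      = init ++ evs.filterMap (fun ev => if f ev = -1 then none else some (f ev)) := by
  induction evs generalizing init with
  | nil => simp
  | cons e t ih =>
    simp only [List.foldl_cons, List.filterMap_cons]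
    by_cases h : f e = -1
    · rw [if_neg (by simp [h]), ih]
      simp [h]
    · rw [if_pos h, ih]
      simp [h]

lemma pvMinAcc {g : Option Int → Int → Option Int}
    (hg : ∀ m x, g (some m) x = some (min m x)) :
    ∀ (l : List Int) (m : Int), l.foldl g (some m) = some (l.foldl min m) := by
  intro l
  induction l with
  | nil => intro m; rfl
  | cons x t ih =>
    intro m
    rw [List.foldl_cons, hg, ih, List.foldl_cons]

lemma pvMin?_eq (l : List Int) : PySem.List.min? l id = l.min? := by
  cases l with
  | nil => rfl
  | cons x t =>
    simp only [PySem.List.min?, List.foldl_cons]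
    show List.foldl _ (some x) t = (x :: t).min?
    rw [pvMinAcc (fun m y => by
        show (if id y < id m then some y else some m) = some (min m y)
        by_cases h : y < m <;> simp [h, min_def]),
      List.min?_cons']

-- min? commutes with a constant shift
lemma pvFoldlMin_add (c : Int) : ∀ (t : List Int) (x : Int),
    (t.map (fun y => c + y)).foldl min (c + x) = c + t.foldl min x := by
  intro t
  induction t with
  | nil => intro x; rfl
  | cons y s ih =>
    intro x
    simp only [List.map_cons, List.foldl_cons]
    rw [min_add_add_left]
    exact ih (min x y)

lemma pvMin?_map_add (c : Int) (l : List Int) :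
    (l.map (fun y => c + y)).min? = l.min?.map (fun y => c + y) := by
  cases l with
  | nil => rfl
  | cons x t =>
    rw [List.map_cons, List.min?_cons', List.min?_cons', pvFoldlMin_add]
    rfl

lemma pvFind_of_prefix (t ev : List Char) (h : ev <+: t) : PySem.Chars.find t ev = 0 := by
  have hinf : ev <:+: t := h.isInfix
  have h0 : 0 ≤ PySem.Chars.find t ev := (PySem.Chars.find_nonneg_iff t ev).2 hinf
  obtain ⟨hp, hmin⟩ := PySem.Chars.find_spec h0
  by_contra hne
  have : (PySem.Chars.find t ev).toNat ≠ 0 := by omega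
  have := hmin 0 (by omega)
  simp at this
  exact this h

-- prefix at a dropped position gives an infix
lemma pvInfix_of_prefix_drop (t ev : List Char) (j : Nat) (h : ev <+: t.drop j) : ev <:+: t :=
  h.isInfix.trans (List.drop_suffix j t).isInfix

-- shifting Python's find by one position when there is no match at position 0
lemma pvFind_shift (t : List Char) (ev : List Char) (h : ¬ ev <+: t) :
    PySem.Chars.find t ev =
      if PySem.Chars.find (t.drop 1) ev = -1 then -1 else 1 + PySem.Chars.find (t.drop 1) ev := by
  by_cases hf : PySem.Chars.find t ev = -1
  · have hni : ¬ ev <:+: t := (PySem.Chars.find_eq_neg_one_iff t ev).1 hf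
    have hg : PySem.Chars.find (t.drop 1) ev = -1 := by
      apply (PySem.Chars.find_eq_neg_one_iff _ ev).2
      intro hinf
      exact hni (hinf.trans (List.drop_suffix 1 t).isInfix)
    rw [hf, hg]
    simp
  · have h0 : 0 ≤ PySem.Chars.find t ev := by
      have := PySem.Chars.neg_one_le_find t ev; omega
    obtain ⟨hp, hmin⟩ := PySem.Chars.find_spec h0
    have hfz : (PySem.Chars.find t ev).toNat ≠ 0 := by
      intro hz; rw [hz] at hp; simp at hp; exact h hp
    have hp1 : ev <+: (t.drop 1).drop ((PySem.Chars.find t ev).toNat - 1) := by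
      rw [List.drop_drop,
        show 1 + ((PySem.Chars.find t ev).toNat - 1) = (PySem.Chars.find t ev).toNat from by omega]
      exact hp
    have hginf : ev <:+: t.drop 1 := pvInfix_of_prefix_drop _ _ _ hp1
    have hg0 : 0 ≤ PySem.Chars.find (t.drop 1) ev := (PySem.Chars.find_nonneg_iff _ ev).2 hginf
    obtain ⟨hgp, hgmin⟩ := PySem.Chars.find_spec hg0
    have hgle : (PySem.Chars.find (t.drop 1) ev).toNat ≤ (PySem.Chars.find t ev).toNat - 1 := by
      by_contra hlt
      exact (hgmin _ (by omega)) hp1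
    have hfle : (PySem.Chars.find t ev).toNat ≤ (PySem.Chars.find (t.drop 1) ev).toNat + 1 := by
      by_contra hlt
      have hdd := hgp
      rw [List.drop_drop] at hdd
      exact (hmin _ (by omega)) hdd
    have hgne : PySem.Chars.find (t.drop 1) ev ≠ -1 := by omega
    simp only [hgne, if_false]
    omega

-- the surviving find results, shifted to start position k
def pvLocs (cs : List Char) (evs : List (List Char)) (k : Nat) : List Int :=
  evs.filterMap (fun ev =>
    if PySem.Chars.find (cs.drop k) ev = -1 then none
    else some ((k : Int) + PySem.Chars.find (cs.drop k) ev))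

lemma pvLocs_shift (cs : List Char) (evs : List (List Char)) (k : Nat)
    (h : ∀ ev ∈ evs, ¬ ev <+: cs.drop k) :
    pvLocs cs evs k = pvLocs cs evs (k + 1) := by
  unfold pvLocs
  apply List.filterMap_congr
  intro ev hev
  have hd : (cs.drop k).drop 1 = cs.drop (k + 1) := by rw [List.drop_drop]
  rw [pvFind_shift _ _ (h ev hev), hd]
  by_cases hg : PySem.Chars.find (cs.drop (k + 1)) ev = -1
  · simp [hg]
  · have h0 : 0 ≤ PySem.Chars.find (cs.drop (k + 1)) ev := by
      have := PySem.Chars.neg_one_le_find (cs.drop (k + 1)) ev; omega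
    have hne2 : ¬(1 + PySem.Chars.find (cs.drop (k + 1)) ev = -1) := by omega
    simp only [if_neg hg, if_neg hne2]
    congr 1
    push_cast
    ring

lemma pvScan_eq (cs : List Char) (evs : List (List Char)) (n : Nat) (hn : n = cs.length) :
    ∀ m k, n + 1 - k ≤ m → k ≤ n →
      pvScan cs evs n k =
        (if (pvLocs cs evs k).length = 0 then none else PySem.List.min? (pvLocs cs evs k) id) := by
  intro m
  induction m with
  | zero => intro k hm hk; omega
  | succ m ih =>
    intro k hm hk
    rw [pvScan]
    simp only [show ¬ k > n by omega, if_false]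
    by_cases hP : evs.any (fun ev => PySem.Chars.startswith (cs.drop k) ev) = true
    · simp only [hP, if_true]
      obtain ⟨ev, hev, hpre⟩ := List.any_eq_true.1 hP
      have hpre : ev <+: cs.drop k := (PySem.Chars.startswith_iff _ _).1 hpre
      have hk_mem : (k : Int) ∈ pvLocs cs evs k := by
        unfold pvLocs
        apply List.mem_filterMap.2
        refine ⟨ev, hev, ?_⟩
        rw [pvFind_of_prefix _ _ hpre]
        simp
      have hlb : ∀ x ∈ pvLocs cs evs k, (k : Int) ≤ x := by
        intro x hx
        unfold pvLocs at hx
        obtain ⟨ev', _, hx'⟩ := List.mem_filterMap.1 hx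
        by_cases hf : PySem.Chars.find (cs.drop k) ev' = -1
        · simp [hf] at hx'
        · simp [hf] at hx'
          have := PySem.Chars.neg_one_le_find (cs.drop k) ev'
          omega
      have hne : (pvLocs cs evs k).length ≠ 0 := by
        intro h0
        rw [List.length_eq_zero_iff] at h0
        rw [h0] at hk_mem
        simp at hk_mem
      simp only [hne, if_false]
      rw [pvMin?_eq, eq_comm, List.min?_eq_some_iff]
      exact ⟨hk_mem, hlb⟩
    · simp only [hP]
      have hnp : ∀ ev ∈ evs, ¬ ev <+: cs.drop k := by
        intro ev hev hpre
        exact hP (List.any_eq_true.2 ⟨ev, hev, (PySem.Chars.startswith_iff _ _).2 hpre⟩)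
      by_cases hkn : k = n
      · have hnil : pvLocs cs evs k = [] := by
          unfold pvLocs
          apply List.filterMap_eq_nil_iff.2
          intro ev hev
          have hdrop : cs.drop k = [] := by rw [hkn, hn]; simp
          have hni : ¬ ev <:+: cs.drop k := by
            rw [hdrop]
            intro hinf
            have hev0 : ev = [] := by simpa using hinf
            subst hev0
            exact hnp _ hev (by simp)
          rw [(PySem.Chars.find_eq_neg_one_iff _ _).2 hni]
          simp
        rw [pvScan, if_pos (by omega : k + 1 > n), hnil]
        simp
      · rw [pvLocs_shift cs evs k hnp]
        exact ih (k + 1) (by omega) (by omega)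

-- findFrom past the end of the string is -1
lemma pvFindFrom_big (cs ev : List Char) (pos : Int) (h : (cs.length : Int) < pos) :
    PySem.Chars.findFrom cs ev pos none = -1 := by
  simp only [PySem.Chars.findFrom]
  split_ifs <;> omega

-- findFrom at an in-range start equals the clamped-Nat form
lemma pvFindFrom_clamp (cs ev : List Char) (pos : Int) (h : pos ≤ (cs.length : Int)) :
    PySem.Chars.findFrom cs ev pos none =
      if PySem.Chars.find (cs.drop (pvClamp cs.length pos)) ev = -1 then -1
      else (pvClamp cs.length pos : Int) + PySem.Chars.find (cs.drop (pvClamp cs.length pos)) ev := by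
  have hk : pvClamp cs.length pos ≤ cs.length := by unfold pvClamp; split_ifs <;> omega
  rw [← PySem.Chars.findFrom_natCast cs ev _ hk]
  simp only [PySem.Chars.findFrom, pvClamp]
  split_ifs <;> simp_all <;> omega

-- Python's slice xs[pos:] is a drop at the clamped position
lemma pvSlice_drop (cs : List Char) (pos : Int) :
    PySem.List.slice cs (some pos) none = cs.drop (pvClamp cs.length pos) := by
  by_cases hneg : pos < 0
  · have hk : 0 < (-pos).toNat := by omega
    have hpe : pos = -(((-pos).toNat : Nat) : Int) := by omega
    rw [hpe, PySem.List.slice_from_neg_natCast cs ((-pos).toNat) hk]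
    congr 1
    unfold pvClamp
    split_ifs <;> omega
  · have hpe : pos = ((pos.toNat : Nat) : Int) := by omega
    rw [hpe, PySem.List.slice_from_natCast]
    simp [pvClamp]
    omega

-- collapsing the nested if of the clamped findFrom inside A's filter
lemma pvAelem (cs : List Char) (K : Nat) (ev : List Char) :
    (if (if PySem.Chars.find (cs.drop K) ev = -1 then (-1 : Int)
          else (K : Int) + PySem.Chars.find (cs.drop K) ev) = -1 then none
      else some (if PySem.Chars.find (cs.drop K) ev = -1 then (-1 : Int)
          else (K : Int) + PySem.Chars.find (cs.drop K) ev))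
    = if PySem.Chars.find (cs.drop K) ev = -1 then none
      else some ((K : Int) + PySem.Chars.find (cs.drop K) ev) := by
  by_cases hc : PySem.Chars.find (cs.drop K) ev = -1
  · simp [hc]
  · have h0 : 0 ≤ PySem.Chars.find (cs.drop K) ev := by
      have := PySem.Chars.neg_one_le_find (cs.drop K) ev; omega
    have : ¬((K : Int) + PySem.Chars.find (cs.drop K) ev = -1) := by omega
    simp [hc, this]

-- A's list at clamped start K is B's tail-relative list shifted by K
lemma pvLocs_map (t : List Char) (evs : List (List Char)) (K : Nat) (cs : List Char)
    (ht : cs.drop K = t) :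
    pvLocs cs evs K = (pvLocs t evs 0).map (fun y => (K : Int) + y) := by
  unfold pvLocs
  rw [List.map_filterMap]
  apply List.filterMap_congr
  intro ev _
  rw [ht]
  simp only [List.drop_zero]
  by_cases hf : PySem.Chars.find t ev = -1
  · simp [hf]
  · simp only [hf, if_false, Option.map_some]
    simp

-- ===== VERDICT (by name: the statement is the Claim_ definition above) =====
theorem get_last_end_value_location_py_spec : Claim_equal_get_last_end_value_location_py := by
  intro string substring pos evs _ hpre
  unfold Spec_get_last_end_value_location_py
  unfold get_last_end_value_location_py get_last_end_value_location_py_alt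
  simp only [PySem.Str.findFrom_eq]
  rw [pvFoldl_filterMap (fun ev => PySem.Chars.findFrom string.toList ev.toList pos) evs []]
  simp only [List.nil_append]
  by_cases hemp : evs.isEmpty
  · rw [if_pos hemp]
    rw [List.isEmpty_iff] at hemp
    subst hemp
    simp
  · rw [if_neg hemp]
    set K := pvClamp string.length pos with hK
    have htail : PySem.List.slice string.toList (some pos) none = string.toList.drop K := by
      rw [pvSlice_drop]
      simp [hK]
    rw [htail]
    by_cases hbig : (string.length : Int) < pos
    · -- start past the end of the string: A collects nothing, and ("" ∉ evs under Pre_)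
      -- B searches the empty slice and finds no nonempty candidate
      have hnb : "" ∉ evs := by
        rcases hpre with h | h
        · omega
        · exact h
      have hA : ∀ ev : String, PySem.Chars.findFrom string.toList ev.toList pos = -1 := by
        intro ev
        exact pvFindFrom_big _ _ _ (by simpa using hbig)
      have hnil : List.filterMap (fun ev =>
          if PySem.Chars.findFrom string.toList ev.toList pos = -1 then none
          else some (PySem.Chars.findFrom string.toList ev.toList pos)) evs = [] := by
        apply List.filterMap_eq_nil_iff.2
        intro ev _
        simp [hA ev]
      rw [hnil]
      have hdrop : string.toList.drop K = [] := by
        apply List.drop_eq_nil_of_le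
        rw [hK]
        unfold pvClamp
        have hsl : string.toList.length = string.length := by simp
        split_ifs <;> omega
      rw [hdrop]
      rw [pvScan_eq [] (evs.map String.toList) ([] : List Char).length rfl 1 0
        (by simp) (by simp)]
      have hnilB : pvLocs [] (evs.map String.toList) 0 = [] := by
        unfold pvLocs
        apply List.filterMap_eq_nil_iff.2
        intro ev hev
        obtain ⟨t, ht, rfl⟩ := List.mem_map.1 hev
        have htne : t.toList ≠ [] := by
          intro h0
          have h2 := congrArg String.ofList h0
          rw [String.ofList_toList] at h2
          have ht0 : t = "" := by simpa using h2
          exact hnb (ht0 ▸ ht)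
        have hni : ¬ t.toList <:+: (([] : List Char).drop 0) := by
          simp only [List.drop_zero]
          intro hinf
          exact htne (by simpa using hinf)
        rw [(PySem.Chars.find_eq_neg_one_iff _ _).2 hni]
        simp
      rw [hnilB]
      simp
    · -- start within the string: both sides reduce to pvLocs at the clamped start K
      have hKle : K ≤ string.length := by
        rw [hK]; unfold pvClamp; split_ifs <;> omega
      have hf : ∀ ev : String, PySem.Chars.findFrom string.toList ev.toList pos =
          if PySem.Chars.find (string.toList.drop K) ev.toList = -1 then -1
          else (K : Int) + PySem.Chars.find (string.toList.drop K) ev.toList := by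
        intro ev
        rw [pvFindFrom_clamp string.toList ev.toList pos (by simpa using le_of_not_gt hbig)]
        simp only [String.length_toList, ← hK]
      have hfm : List.filterMap (fun ev =>
          if PySem.Chars.findFrom string.toList ev.toList pos = -1 then none
          else some (PySem.Chars.findFrom string.toList ev.toList pos)) evs
          = pvLocs string.toList (evs.map String.toList) K := by
        unfold pvLocs
        rw [List.filterMap_map]
        apply List.filterMap_congr
        intro ev _
        simp only [Function.comp, hf ev]
        exact pvAelem string.toList K ev.toList
      rw [hfm]
      set t := string.toList.drop K with htdef
      have htK : string.toList.drop K = t := rfl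
      have hoff : (string.length : Int) - (t.length : Int) = (K : Int) := by
        rw [htdef, List.length_drop, String.length_toList]
        omega
      rw [pvScan_eq t (evs.map String.toList) t.length rfl (t.length + 1) 0 (by omega) (by omega)]
      rw [pvLocs_map t (evs.map String.toList) K string.toList htK]
      by_cases h0 : (pvLocs t (evs.map String.toList) 0).length = 0
      · rw [List.length_eq_zero_iff] at h0
        rw [h0]
        simp
      · have h0' : ¬ ((pvLocs t (evs.map String.toList) 0).map
            (fun y => (K : Int) + y)).length = 0 := by
          simpa using h0
        rw [if_neg h0, if_neg h0', pvMin?_eq, pvMin?_eq, pvMin?_map_add, hoff]
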